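-- pv_equiv track=rewrite | github.com/Shirmyyy/CS313E | BabyNames.py | lessPopular
-- ===== SOURCE A (Python) =====
-- def lessPopular(lst):
--     for i in range (len(lst)):
--         if lst[i]==0:
--             lst[i]=1001
--     for i in range (len(lst)-1):
--         if lst[i+1]<=lst[i]:
--             return False
--     return True
-- ===== SOURCE B (Python) =====
-- def lessPopular(lst):
--     # Same in-place zero -> 1001 mutation as A, then strict monotonicity
--     # tested via sort + distinctness instead of an adjacent-pair scan.
--     lst[:] = [1001 if x == 0 else x for x in lst]
--     return lst == sorted(lst) and len(set(lst)) == len(lst)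
-- ===== Notes on version B (the rewrite author's own statement) =====
-- stated objective: alternative
-- what changed: After the same zero->1001 replacement pass, B decides strict increase by comparing the list with its sorted copy and checking all elements are distinct via a set, instead of A's adjacent-pair scan with early return.
import Mathlib
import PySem

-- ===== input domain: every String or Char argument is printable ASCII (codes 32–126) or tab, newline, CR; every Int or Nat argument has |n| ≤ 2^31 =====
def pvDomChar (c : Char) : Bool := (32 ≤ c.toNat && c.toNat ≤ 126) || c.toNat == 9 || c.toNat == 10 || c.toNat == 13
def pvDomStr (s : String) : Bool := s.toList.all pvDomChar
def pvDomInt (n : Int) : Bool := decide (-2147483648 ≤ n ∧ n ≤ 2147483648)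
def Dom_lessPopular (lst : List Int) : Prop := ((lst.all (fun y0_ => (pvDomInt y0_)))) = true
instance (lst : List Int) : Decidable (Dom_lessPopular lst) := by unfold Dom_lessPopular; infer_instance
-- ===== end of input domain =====

-- B replaces A's adjacent-pair scan by a sort-and-distinctness test after the same
-- zero->1001 replacement; equivalence is about the RETURN value (both Pythons perform
-- the identical in-place mutation of the argument list).

-- ===== PORT A =====
-- second loop of A: scan adjacent pairs, early return False
def lessPopularScan : List Int → Bool
  | a :: b :: t => if b ≤ a then false else lessPopularScan (b :: t)
  | _ => true

def lessPopular (lst : List Int) : Bool :=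
  lessPopularScan (lst.map (fun x => if x = 0 then 1001 else x))

-- ===== PORT B =====
def lessPopular_alt (lst : List Int) : Bool :=
  let m := lst.map (fun x => if x = 0 then 1001 else x)
  decide (m = PySem.List.sorted m (fun x => x) false) &&
    decide ((PySem.Set.ofList m).length = m.length)

-- ===== PRECONDITION & SPEC =====
def Spec_lessPopular (lst : List Int) (out : Bool) : Prop := out = lessPopular_alt lst
instance (lst : List Int) (out : Bool) : Decidable (Spec_lessPopular lst out) := by unfold Spec_lessPopular; infer_instance

-- ===== CLAIM (what is proved, stated in full; the proofs are below) =====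
def Claim_equal_lessPopular : Prop := ∀ (lst : List Int), Dom_lessPopular lst → Spec_lessPopular lst (lessPopular lst)

-- ===== LEMMAS AND PROOFS =====

theorem lessPopularScan_eq_pairwise (l : List Int) :
    lessPopularScan l = decide (l.Pairwise (· < ·)) := by
  induction l with
  | nil => simp [lessPopularScan]
  | cons a t ih =>
    cases t with
    | nil => simp [lessPopularScan]
    | cons b u =>
      by_cases h : b ≤ a
      · have hnp : ¬ (a :: b :: u).Pairwise (· < ·) := fun hp =>
          absurd ((List.pairwise_cons.1 hp).1 b (by simp)) (by omega)
        simp [lessPopularScan, h, hnp]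
      · have hiff : (a :: b :: u).Pairwise (· < ·) ↔ (b :: u).Pairwise (· < ·) := by
          constructor
          · exact List.Pairwise.of_cons
          · intro hp
            refine List.pairwise_cons.2 ⟨?_, hp⟩
            intro x hx
            rcases List.mem_cons.1 hx with rfl | hxu
            · omega
            · have := (List.pairwise_cons.1 hp).1 x hxu; omega
        simp [lessPopularScan, h, ih, hiff]

theorem ofList_sublist (l : List Int) : List.Sublist (PySem.Set.ofList l) l := by
  induction l with
  | nil => simp [PySem.Set.ofList]
  | cons x xs ih =>
    rw [PySem.Set.ofList_cons]
    have h1 : List.Sublist (PySem.Set.discard (PySem.Set.ofList xs) x) (PySem.Set.ofList xs) := by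
      unfold PySem.Set.discard; exact List.filter_sublist
    exact List.Sublist.cons₂ x (h1.trans ih)

theorem scan_eq_alt_core (m : List Int) :
    lessPopularScan m =
      (decide (m = PySem.List.sorted m (fun x => x) false) &&
        decide ((PySem.Set.ofList m).length = m.length)) := by
  rw [lessPopularScan_eq_pairwise]
  rcases h : decide (m.Pairwise (· < ·)) with _ | _
  · -- not strictly increasing: at least one of the two conjuncts fails
    rw [decide_eq_false_iff_not] at h
    by_cases hs : m = PySem.List.sorted m (fun x => x) false
    · -- sorted but not strictly increasing ⇒ a duplicate ⇒ ofList shorter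
      have hle : m.Pairwise (· ≤ ·) := by
        have := PySem.List.sorted_pairwise (xs := m) (key := fun x => x)
        rw [← hs] at this
        exact this
      have hnd : ¬ m.Nodup := by
        intro hnd
        exact h ((List.Pairwise.and hle hnd).imp (by intro a b ⟨h1, h2⟩; omega))
      have : PySem.Set.ofList m ≠ m := by
        intro he
        exact hnd (he ▸ PySem.Set.nodup_ofList m)
      have hlt : (PySem.Set.ofList m).length ≠ m.length := by
        intro hlen
        exact this (List.Sublist.eq_of_length (ofList_sublist m) hlen)
      simp [hlt]
    · simp [hs]
  · rw [decide_eq_true_iff] at h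
    have hs : PySem.List.sorted m (fun x => x) false = m :=
      PySem.List.sorted_eq_of_perm_of_pairwise_lt m m (fun x => x) (List.Perm.refl m) h
    have hnd : m.Nodup := h.imp (by intro a b hab; omega)
    have : PySem.Set.ofList m = m := PySem.Set.ofList_eq_self_of_nodup m hnd
    simp [hs, this]

-- ===== VERDICT (by name: the statement is the Claim_ definition above) =====
theorem lessPopular_spec : Claim_equal_lessPopular := by
  intro lst _
  unfold Spec_lessPopular lessPopular lessPopular_alt
  exact scan_eq_alt_core _
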